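-- pv_equiv track=rewrite | github.com/kanak640/ds | mark.py | highest_lowest
-- ===== SOURCE A (Python) =====
-- def highest_lowest(marks):
--     valid=[]
--     for mark in marks:
--         if mark==-1:
--           continue
--         else:
--           valid.append(mark)
--     if valid:
--        return max(valid),min(valid)
--     else:
--        return 0
-- ===== SOURCE B (Python) =====
-- def highest_lowest(marks):
--     hi = lo = None
--     for m in marks:
--         if m == -1:
--             continue
--         if hi is None:
--             hi = lo = m
--         else:
--             if m > hi:
--                 hi = m
--             if m < lo:
--                 lo = m
--     return (hi, lo) if hi is not None else 0
-- ===== Notes on version B (the rewrite author's own statement) =====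
-- stated objective: alternative
-- what changed: Replaces A's build-a-filtered-list-then-scan-it-twice-with-max-and-min (three passes, extra list) by a single accumulating pass keeping running hi/lo in an Option state.
-- outside the precondition, e.g. on highest_lowest([-1]): A returns 0, B returns 0; on highest_lowest([]): A returns 0, B returns 0
import Mathlib
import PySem

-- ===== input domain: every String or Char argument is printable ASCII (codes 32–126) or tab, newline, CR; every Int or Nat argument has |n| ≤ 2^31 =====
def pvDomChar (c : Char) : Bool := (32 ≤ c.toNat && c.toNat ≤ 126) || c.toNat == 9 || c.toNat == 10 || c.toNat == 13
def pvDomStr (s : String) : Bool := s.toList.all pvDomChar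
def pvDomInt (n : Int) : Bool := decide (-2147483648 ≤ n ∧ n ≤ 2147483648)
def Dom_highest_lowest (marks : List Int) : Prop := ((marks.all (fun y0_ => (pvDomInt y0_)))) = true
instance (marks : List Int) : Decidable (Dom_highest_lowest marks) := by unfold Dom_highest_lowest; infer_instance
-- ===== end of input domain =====

-- B replaces A's filter-then-max-then-min (three passes and an intermediate list) by one
-- accumulating pass carrying running (hi, lo) in an Option state.


-- ===== PORT A =====
-- valid = []; for mark in marks: append unless mark == -1; then (max(valid), min(valid)).
-- The all-sentinel branch (Python's `return 0`, not a pair) is outside Pre_; (0, 0) is a placeholder there.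
def highest_lowest (marks : List Int) : Int × Int :=
  let valid := marks.foldl (fun acc mark => if mark = -1 then acc else acc ++ [mark]) []
  if valid ≠ [] then
    ((PySem.List.max? valid (fun y => y)).getD 0, (PySem.List.min? valid (fun y => y)).getD 0)
  else (0, 0)

-- ===== PORT B =====
-- single pass: Option (hi, lo) state; the all-sentinel branch (Python's `return 0`) is outside Pre_.
def hlStep (acc : Option (Int × Int)) (m : Int) : Option (Int × Int) :=
  if m = -1 then acc
  else
    match acc with
    | none => some (m, m)
    | some (hi, lo) => some (if m > hi then m else hi, if m < lo then m else lo)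

def highest_lowest_alt (marks : List Int) : Int × Int :=
  match marks.foldl hlStep none with
  | some p => p
  | none => (0, 0)

-- ===== PRECONDITION & SPEC =====
-- Pre_ excludes inputs whose elements are all -1 (including []): there Python A returns the bare
-- int 0 instead of a pair, which is not a value of the declared Int × Int type (B returns 0 too).
def Pre_highest_lowest (marks : List Int) : Prop := ∃ m ∈ marks, m ≠ -1
instance (marks : List Int) : Decidable (Pre_highest_lowest marks) := by unfold Pre_highest_lowest; infer_instance
def pvWitness_highest_lowest : List Int := [3, -1, 7]

def Spec_highest_lowest (marks : List Int) (out : Int × Int) : Prop := out = highest_lowest_alt marks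
instance (marks : List Int) (out : Int × Int) : Decidable (Spec_highest_lowest marks out) := by unfold Spec_highest_lowest; infer_instance

-- ===== CLAIM (what is proved, stated in full; the proofs are below) =====
def Claim_equal_highest_lowest : Prop := ∀ (marks : List Int), Dom_highest_lowest marks → Pre_highest_lowest marks → Spec_highest_lowest marks (highest_lowest marks)

-- ===== LEMMAS AND PROOFS =====

-- A's accumulation loop builds exactly the filtered list.
theorem hl_foldl_filter (l : List Int) (acc : List Int) :
    l.foldl (fun acc mark => if mark = -1 then acc else acc ++ [mark]) acc
      = acc ++ l.filter (fun m => decide ¬(m = -1)) := by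
  induction l generalizing acc with
  | nil => simp
  | cons x t ih =>
    by_cases hx : x = -1 <;> simp [List.foldl, hx, ih, List.filter_cons]

-- B's fold with a seeded state tracks running max/min over the filtered tail.
theorem hl_fold_some (l : List Int) (hi lo : Int) :
    l.foldl hlStep (some (hi, lo))
      = some ((l.filter (fun m => decide ¬(m = -1))).foldl max hi,
              (l.filter (fun m => decide ¬(m = -1))).foldl min lo) := by
  induction l generalizing hi lo with
  | nil => simp
  | cons x t ih =>
    by_cases hx : x = -1
    · simp [List.foldl, hlStep, hx, List.filter_cons, ih]
    · have h1 : (if x > hi then x else hi) = max hi x := by omega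
      have h2 : (if x < lo then x else lo) = min lo x := by omega
      simp [List.foldl, hlStep, hx, h1, h2, ih]

-- B's fold from the empty state, characterised by the filtered list.
theorem hl_fold_none (l : List Int) :
    l.foldl hlStep none
      = match l.filter (fun m => decide ¬(m = -1)) with
        | [] => none
        | x :: t => some (t.foldl max x, t.foldl min x) := by
  induction l with
  | nil => simp
  | cons x t ih =>
    by_cases hx : x = -1
    · simpa [List.foldl, hlStep, hx, List.filter_cons] using ih
    · simp [List.foldl, hlStep, hx, List.filter_cons, hl_fold_some]

-- ===== VERDICT (by name: the statement is the Claim_ definition above) =====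
theorem highest_lowest_spec : Claim_equal_highest_lowest := by
  intro marks _ hpre
  have hne : marks.filter (fun m => decide ¬(m = -1)) ≠ [] := by
    obtain ⟨m, hm, hne⟩ := hpre
    intro h
    have : m ∈ marks.filter (fun m => decide ¬(m = -1)) :=
      List.mem_filter.mpr ⟨hm, by simpa using hne⟩
    rw [h] at this
    exact absurd this (List.not_mem_nil)
  obtain ⟨x, t, hft⟩ := List.exists_cons_of_ne_nil hne
  unfold Spec_highest_lowest highest_lowest highest_lowest_alt
  simp only [hl_foldl_filter, List.nil_append, hl_fold_none, hft]
  simp [PySem.List.max?_id_cons, PySem.List.min?_id_cons]
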